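-- pv_equiv track=rewrite | github.com/elroi773/Coding-Test | 프로그래머스/2/42626. 더 맵게/더 맵게.py | solution
-- ===== SOURCE A (Python) =====
-- import heapq
--
-- def solution(scoville, K):
--     heapq.heapify(scoville)  # 리스트를 최소 힙으로 변환
--     count = 0
--
--     while scoville[0] < K:
--         if len(scoville) < 2:
--             return -1
--
--         first = heapq.heappop(scoville)
--         second = heapq.heappop(scoville)
--
--         mixed = first + second * 2
--         heapq.heappush(scoville, mixed)
--
--         count += 1
--
--     return count
-- ===== SOURCE B (Python) =====
-- def solution(scoville, K):
--     count = 0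
--     while min(scoville) < K:
--         if len(scoville) < 2:
--             return -1
--         a = scoville.pop(scoville.index(min(scoville)))
--         b = scoville.pop(scoville.index(min(scoville)))
--         scoville.append(a + b * 2)
--         count += 1
--     return count
-- ===== Notes on version B (the rewrite author's own statement) =====
-- stated objective: simpler
-- what changed: Replaces the heapq min-heap with a plain list: each round finds and removes the two smallest elements by linear scan (min + index + pop) and appends the mix; no heap invariant or heapify.
import Mathlib
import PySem

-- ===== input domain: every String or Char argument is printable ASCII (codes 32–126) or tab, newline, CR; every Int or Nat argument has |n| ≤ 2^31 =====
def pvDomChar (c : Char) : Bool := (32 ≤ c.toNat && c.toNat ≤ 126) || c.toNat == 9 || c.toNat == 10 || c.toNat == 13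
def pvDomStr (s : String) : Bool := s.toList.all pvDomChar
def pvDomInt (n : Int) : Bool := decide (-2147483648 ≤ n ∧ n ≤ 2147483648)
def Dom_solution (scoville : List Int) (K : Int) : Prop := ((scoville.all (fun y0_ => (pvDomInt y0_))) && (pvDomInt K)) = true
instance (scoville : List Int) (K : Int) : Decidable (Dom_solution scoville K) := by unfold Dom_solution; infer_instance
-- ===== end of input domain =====

-- B drops heapq and removes the two smallest elements by linear scan on a plain list (simpler, no heap invariant).
-- Both A and B mutate the argument list in place; the equivalence proved here is about the RETURN value only.


-- ===== PORT A =====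
-- heapq is modelled as an ordered list: heapify = insertionSort, heappop = take the head,
-- heappush = ordered insert.  This is exact for every VALUE heapq hands back (pop returns the
-- minimum), which is all `solution` observes.
-- while scoville[0] < K: …  (scoville[0] on the empty list raises IndexError: excluded by Pre_)
def heapLoop (h : List Int) (K : Int) (count : Int) : Int :=
  match h with
  | [] => count                              -- unreachable under Pre_ (Python raises here)
  | h0 :: t =>
    if h0 < K then
      match t with
      | [] => -1                             -- len(scoville) < 2
      | s :: r =>
        -- first = heappop; second = heappop; mixed = first + second*2; heappush mixed
        heapLoop (List.orderedInsert (· ≤ ·) (h0 + s * 2) r) K (count + 1)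
    else count
termination_by h.length
decreasing_by simp [List.orderedInsert_length]

def solution (scoville : List Int) (K : Int) : Int :=
  heapLoop (List.insertionSort (· ≤ ·) scoville) K 0

-- ===== PORT B =====
-- while min(l) < K: pop the first minimum twice (pop(index(min)) = erase the first occurrence
-- of the minimal value), append the mix.
def altLoop (l : List Int) (K : Int) (count : Int) : Int :=
  match hm : PySem.List.min? l (fun x => x) with
  | none => count                            -- min([]) raises ValueError: excluded by Pre_
  | some m =>
    if m < K then
      if l.length < 2 then -1
      else
        match hm2 : PySem.List.min? (l.erase m) (fun x => x) with
        | none => -1                         -- unreachable: l.erase m ≠ [] when l.length ≥ 2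
        | some m2 =>
          altLoop (((l.erase m).erase m2) ++ [m + m2 * 2]) K (count + 1)
    else count
termination_by l.length
decreasing_by
  have h1 : m ∈ l := PySem.List.min?_mem hm
  have h2 : m2 ∈ l.erase m := PySem.List.min?_mem hm2
  have e1 : (l.erase m).length = l.length - 1 := List.length_erase_of_mem h1
  have e2 : ((l.erase m).erase m2).length = (l.erase m).length - 1 := List.length_erase_of_mem h2
  simp only [List.length_append, List.length_cons, List.length_nil, e2, e1]
  omega

def solution_alt (scoville : List Int) (K : Int) : Int :=
  altLoop scoville K 0

-- ===== PRECONDITION & SPEC =====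
-- Pre_ excludes exactly the empty list, on which A raises IndexError (scoville[0]).
def Pre_solution (scoville : List Int) (K : Int) : Prop := scoville ≠ []
instance (scoville : List Int) (K : Int) : Decidable (Pre_solution scoville K) := by unfold Pre_solution; infer_instance
def pvWitness_solution : List Int × Int := ([1, 2, 3, 9, 10, 12], 7)

def Spec_solution (scoville : List Int) (K : Int) (out : Int) : Prop := out = solution_alt scoville K
instance (scoville : List Int) (K : Int) (out : Int) : Decidable (Spec_solution scoville K out) := by unfold Spec_solution; infer_instance

-- ===== CLAIM (what is proved, stated in full; the proofs are below) =====
def Claim_equal_solution : Prop := ∀ (scoville : List Int) (K : Int), Dom_solution scoville K → Pre_solution scoville K → Spec_solution scoville K (solution scoville K)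

-- ===== LEMMAS AND PROOFS =====


lemma heapLoop_nil (K c : Int) : heapLoop [] K c = c := by
  rw [heapLoop.eq_def]

lemma heapLoop_stop {h0 K : Int} (t : List Int) (c : Int) (hK : ¬ h0 < K) :
    heapLoop (h0 :: t) K c = c := by
  rw [heapLoop.eq_def]; simp [hK]

lemma heapLoop_one {h0 K : Int} (c : Int) (hK : h0 < K) :
    heapLoop [h0] K c = -1 := by
  rw [heapLoop.eq_def]; simp [hK]

lemma heapLoop_step {h0 s K : Int} (r : List Int) (c : Int) (hK : h0 < K) :
    heapLoop (h0 :: s :: r) K c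
      = heapLoop (List.orderedInsert (· ≤ ·) (h0 + s * 2) r) K (c + 1) := by
  rw [heapLoop.eq_def]; simp [hK]

lemma altLoop_nil (K c : Int) : altLoop [] K c = c := by
  rw [altLoop.eq_def]; simp [PySem.List.min?]

lemma altLoop_stop {l : List Int} {m K : Int} (c : Int)
    (hm : PySem.List.min? l (fun x => x) = some m) (hK : ¬ m < K) :
    altLoop l K c = c := by
  rw [altLoop.eq_def]
  split
  · rfl
  · rename_i m' heq; rw [hm] at heq; injection heq with heq; subst heq; simp [hK]

lemma altLoop_one {l : List Int} {m K : Int} (c : Int)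
    (hm : PySem.List.min? l (fun x => x) = some m) (hK : m < K) (hlen : l.length < 2) :
    altLoop l K c = -1 := by
  rw [altLoop.eq_def]
  split
  · rename_i heq; rw [hm] at heq; cases heq
  · rename_i m' heq; rw [hm] at heq; injection heq with heq; subst heq; simp [hK, hlen]

lemma altLoop_step {l : List Int} {m m2 K : Int} (c : Int)
    (hm : PySem.List.min? l (fun x => x) = some m) (hK : m < K) (hlen : ¬ l.length < 2)
    (hm2 : PySem.List.min? (l.erase m) (fun x => x) = some m2) :
    altLoop l K c = altLoop ((l.erase m).erase m2 ++ [m + m2 * 2]) K (c + 1) := by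
  rw [altLoop.eq_def]
  split
  · rename_i heq; rw [hm] at heq; cases heq
  · rename_i m' heq; rw [hm] at heq; injection heq with heq; subst heq
    simp only [if_pos hK, if_neg hlen]
    split
    · rename_i heq2; rw [hm2] at heq2; cases heq2
    · rename_i m2' heq2; rw [hm2] at heq2; injection heq2 with heq2; subst heq2; rfl

-- the first minimum of l is the head of any sorted permutation of l
lemma min?_of_sorted_perm {h0 : Int} {t l : List Int}
    (hs : (h0 :: t).Sorted (· ≤ ·)) (hp : (h0 :: t).Perm l) :
    PySem.List.min? l (fun x => x) = some h0 := by
  have hne : l ≠ [] := by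
    intro h; subst h; exact absurd hp.length_eq (by simp)
  obtain ⟨m, hm⟩ : ∃ m, PySem.List.min? l (fun x => x) = some m := by
    cases hml : PySem.List.min? l (fun x => x) with
    | none => exact absurd ((PySem.List.min?_eq_none_iff l (fun x => x)).mp hml) hne
    | some m => exact ⟨m, rfl⟩
  have hmem : m ∈ l := PySem.List.min?_mem hm
  have hmin : ∀ y ∈ l, m ≤ y := fun y hy => PySem.List.min?_isMin hm y hy
  have h0mem : h0 ∈ l := hp.mem_iff.mp (by simp)
  have hle : m ≤ h0 := hmin h0 h0mem
  have hge : h0 ≤ m := by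
    have := hp.symm.mem_iff.mp hmem
    rcases List.mem_cons.mp this with h | h
    · exact le_of_eq h.symm
    · exact (List.sorted_cons.mp hs).1 m h
  rw [hm, le_antisymm hle hge]

lemma loop_eq (n : Nat) : ∀ (h l : List Int) (K c : Int),
    h.length ≤ n → h.Sorted (· ≤ ·) → h.Perm l → heapLoop h K c = altLoop l K c := by
  induction n with
  | zero =>
    intro h l K c hlen hs hp
    have : h = [] := List.length_eq_zero_iff.mp (Nat.le_zero.mp hlen)
    subst this
    have : l = [] := hp.symm.eq_nil
    subst this
    rw [heapLoop_nil, altLoop_nil]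
  | succ n ih =>
    intro h l K c hlen hs hp
    match h with
    | [] =>
      have : l = [] := hp.symm.eq_nil
      subst this
      rw [heapLoop_nil, altLoop_nil]
    | h0 :: t =>
      have hmin := min?_of_sorted_perm hs hp
      by_cases hK : h0 < K
      · have hlerase : (l.erase h0).Perm t := by
          have := (hp.symm.erase h0); simpa using this
        match t with
        | [] =>
          have hlen1 : l.length = 1 := by simpa using hp.length_eq.symm
          rw [heapLoop_one _ hK, altLoop_one _ hmin hK (by omega)]
        | s :: r =>
          have hlen2 : ¬ l.length < 2 := by
            have := hp.length_eq; simp at this; omega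
          have hts : (s :: r).Sorted (· ≤ ·) := (List.sorted_cons.mp hs).2
          have hmin2 := min?_of_sorted_perm hts hlerase.symm
          have herase2 : ((l.erase h0).erase s).Perm r := by
            have := (hlerase.erase s); simpa using this
          rw [heapLoop_step _ _ hK, altLoop_step _ hmin hK hlen2 hmin2]
          have hperm' : (List.orderedInsert (· ≤ ·) (h0 + s * 2) r).Perm
              (((l.erase h0).erase s) ++ [h0 + s * 2]) := by
            refine (List.perm_orderedInsert _ _ _).trans ?_
            refine ((herase2.symm.cons _).trans ?_)
            exact (List.perm_append_singleton _ _).symm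
          have hsort' : (List.orderedInsert (· ≤ ·) (h0 + s * 2) r).Sorted (· ≤ ·) :=
            List.Pairwise.orderedInsert _ _ (List.sorted_cons.mp hts).2
          have hlen' : (List.orderedInsert (· ≤ ·) (h0 + s * 2) r).length ≤ n := by
            rw [List.orderedInsert_length]
            have : (h0 :: s :: r).length ≤ n + 1 := hlen
            simp at this ⊢; omega
          exact ih _ _ K (c + 1) hlen' hsort' hperm'
      · rw [heapLoop_stop _ _ hK, altLoop_stop _ hmin hK]

-- ===== VERDICT (by name: the statement is the Claim_ definition above) =====
theorem solution_spec : Claim_equal_solution := by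
  intro scoville K _ _
  unfold Spec_solution solution solution_alt
  exact loop_eq scoville.length _ _ K 0
    (by simpa using (List.perm_insertionSort (· ≤ ·) scoville).length_eq.le)
    (List.sorted_insertionSort _ _)
    (List.perm_insertionSort _ _)
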